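-- pv_equiv track=rewrite | github.com/sylvia-griffin/creating_a_game_with_python | senses.py | get_word_at_cell
-- ===== SOURCE A (Python) =====
-- answers = [
--     ("SMELL", 1, 4, "across"),
--     ("TOUCH", 4, 0, "across"),
--     ("HEARING", 0, 6, "down"),
--     ("SIGHT", 1, 4, "down"),
--     ("TASTE", 4, 0, "down"),
-- ]
--
-- def get_word_at_cell(row, col):
--     for word, start_row, start_col, direction in answers:
--         for i in range(len(word)):
--             r = start_row + i if direction == "down" else start_row
--             c = start_col + i if direction == "across" else start_col
--             if r == row and c == col:
--                 return word, start_row, start_col, direction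
--     return None
-- ===== SOURCE B (Python) =====
-- answers = [
--     ("SMELL", 1, 4, "across"),
--     ("TOUCH", 4, 0, "across"),
--     ("HEARING", 0, 6, "down"),
--     ("SIGHT", 1, 4, "down"),
--     ("TASTE", 4, 0, "down"),
-- ]
--
-- _cell_index = {}
-- for _ans in answers:
--     _word, _sr, _sc, _dir = _ans
--     for _i in range(len(_word)):
--         _r = _sr + _i if _dir == "down" else _sr
--         _c = _sc + _i if _dir == "across" else _sc
--         _cell_index.setdefault((_r, _c), _ans)
--
-- def get_word_at_cell(row, col):
--     return _cell_index.get((row, col))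
-- ===== Notes on version B (the rewrite author's own statement) =====
-- stated objective: faster
-- what changed: Precomputes once a dict mapping each covered cell to its first covering answer (setdefault preserves A's first-match order), so the lookup is a single dict get instead of rescanning every answer's cells per call.
import Mathlib
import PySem

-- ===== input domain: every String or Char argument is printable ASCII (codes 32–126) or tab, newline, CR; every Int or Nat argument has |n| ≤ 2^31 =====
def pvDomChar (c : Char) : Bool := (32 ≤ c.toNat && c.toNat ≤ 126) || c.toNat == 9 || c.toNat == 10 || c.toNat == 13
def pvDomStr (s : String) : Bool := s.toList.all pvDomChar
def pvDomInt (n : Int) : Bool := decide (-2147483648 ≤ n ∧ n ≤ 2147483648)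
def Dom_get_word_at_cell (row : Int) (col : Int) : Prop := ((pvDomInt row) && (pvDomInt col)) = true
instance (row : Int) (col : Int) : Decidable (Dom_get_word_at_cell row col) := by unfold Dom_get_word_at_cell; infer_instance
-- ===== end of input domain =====

-- B precomputes once a cell -> answer index (first answer covering a cell wins, as in A's scan order), so each lookup is a single dict get.


-- ===== PORT A =====
def answersA : List (String × Int × Int × String) :=
  [("SMELL", 1, 4, "across"), ("TOUCH", 4, 0, "across"), ("HEARING", 0, 6, "down"),
   ("SIGHT", 1, 4, "down"), ("TASTE", 4, 0, "down")]

-- A's inner loop: 'for i in range(len(word)): … if r == row and c == col: return …'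
def innerA (row col sr sc : Int) (dir : String) : List Int → Bool
  | [] => false
  | i :: rest =>
      let r := if dir == "down" then sr + i else sr
      let c := if dir == "across" then sc + i else sc
      if r == row && c == col then true else innerA row col sr sc dir rest

-- A's outer loop over the answers (early return on the first hit)
def outerA (row col : Int) : List (String × Int × Int × String) → Option (String × Int × Int × String)
  | [] => none
  | (word, sr, sc, dir) :: rest =>
      if innerA row col sr sc dir (PySem.List.pyRange 0 (PySem.Str.len word) 1) then
        some (word, sr, sc, dir)
      else outerA row col rest

def get_word_at_cell (row : Int) (col : Int) : Option (String × Int × Int × String) :=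
  outerA row col answersA

-- ===== PORT B =====
-- dict.setdefault: insert only if the key is absent
def setdefaultB (d : PySem.Dict (Int × Int) (String × Int × Int × String))
    (k : Int × Int) (v : String × Int × Int × String) :
    PySem.Dict (Int × Int) (String × Int × Int × String) :=
  match d.get? k with
  | some _ => d
  | none => d.insert k v

-- the module-level index build: for each answer, for each i in range(len(word)), setdefault the cell
def cellIndexB : PySem.Dict (Int × Int) (String × Int × Int × String) :=
  answersA.foldl
    (fun d ans =>
      let (word, sr, sc, dir) := ans
      (PySem.List.pyRange 0 (PySem.Str.len word) 1).foldl
        (fun d i =>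
          let r := if dir == "down" then sr + i else sr
          let c := if dir == "across" then sc + i else sc
          setdefaultB d (r, c) ans)
        d)
    PySem.Dict.empty

def get_word_at_cell_alt (row : Int) (col : Int) : Option (String × Int × Int × String) :=
  cellIndexB.get? (row, col)

-- ===== PRECONDITION & SPEC =====
def Spec_get_word_at_cell (row : Int) (col : Int) (out : Option (String × Int × Int × String)) : Prop := out = get_word_at_cell_alt row col
instance (row : Int) (col : Int) (out : Option (String × Int × Int × String)) : Decidable (Spec_get_word_at_cell row col out) := by unfold Spec_get_word_at_cell; infer_instance

-- ===== CLAIM (what is proved, stated in full; the proofs are below) =====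
def Claim_equal_get_word_at_cell : Prop := ∀ (row : Int) (col : Int), Dom_get_word_at_cell row col → Spec_get_word_at_cell row col (get_word_at_cell row col)

-- ===== LEMMAS AND PROOFS =====
-- A's inner loop returns false when no index in the list hits the queried cell.
theorem innerA_false (row col sr sc : Int) (dir : String) (l : List Int)
    (h : ∀ i ∈ l, ¬((if dir == "down" then sr + i else sr) = row ∧
                    (if dir == "across" then sc + i else sc) = col)) :
    innerA row col sr sc dir l = false := by
  induction l with
  | nil => rfl
  | cons i rest ih =>
    simp only [innerA]
    rw [if_neg (by intro hc
                   apply h i List.mem_cons_self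
                   simp only [Bool.and_eq_true, beq_iff_eq] at hc ⊢
                   exact hc)]
    exact ih (fun j hj => h j (List.mem_cons_of_mem _ hj))

-- Every covered cell lies in 0 ≤ row ≤ 8, 0 ≤ col ≤ 8; off the board A returns none.
theorem a_none_outside (row col : Int)
    (h : ¬(0 ≤ row ∧ row ≤ 8 ∧ 0 ≤ col ∧ col ≤ 8)) :
    get_word_at_cell row col = none := by
  have l1 : PySem.Str.len "SMELL" = 5 := by decide
  have l2 : PySem.Str.len "TOUCH" = 5 := by decide
  have l3 : PySem.Str.len "HEARING" = 7 := by decide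
  have l4 : PySem.Str.len "SIGHT" = 5 := by decide
  have l5 : PySem.Str.len "TASTE" = 5 := by decide
  simp only [get_word_at_cell, outerA, answersA, l1, l2, l3, l4, l5]
  rw [innerA_false row col 1 4 "across" _ ?_, innerA_false row col 4 0 "across" _ ?_,
      innerA_false row col 0 6 "down" _ ?_, innerA_false row col 1 4 "down" _ ?_,
      innerA_false row col 4 0 "down" _ ?_]
  · rfl
  all_goals
    intro i hi
    rw [PySem.List.mem_pyRange_one] at hi
    simp only [String.reduceBEq, Bool.false_eq_true, if_false, not_and]
    omega

-- B's precomputed index, written out (verified by the kernel), and: off the board B returns none.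
theorem b_none_outside (row col : Int)
    (h : ¬(0 ≤ row ∧ row ≤ 8 ∧ 0 ≤ col ∧ col ≤ 8)) :
    get_word_at_cell_alt row col = none := by
  have hd : cellIndexB = PySem.Dict.mk [
    ((1, 4), ("SMELL", 1, 4, "across")),
    ((1, 5), ("SMELL", 1, 4, "across")),
    ((1, 6), ("SMELL", 1, 4, "across")),
    ((1, 7), ("SMELL", 1, 4, "across")),
    ((1, 8), ("SMELL", 1, 4, "across")),
    ((4, 0), ("TOUCH", 4, 0, "across")),
    ((4, 1), ("TOUCH", 4, 0, "across")),
    ((4, 2), ("TOUCH", 4, 0, "across")),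
    ((4, 3), ("TOUCH", 4, 0, "across")),
    ((4, 4), ("TOUCH", 4, 0, "across")),
    ((0, 6), ("HEARING", 0, 6, "down")),
    ((2, 6), ("HEARING", 0, 6, "down")),
    ((3, 6), ("HEARING", 0, 6, "down")),
    ((4, 6), ("HEARING", 0, 6, "down")),
    ((5, 6), ("HEARING", 0, 6, "down")),
    ((6, 6), ("HEARING", 0, 6, "down")),
    ((2, 4), ("SIGHT", 1, 4, "down")),
    ((3, 4), ("SIGHT", 1, 4, "down")),
    ((5, 4), ("SIGHT", 1, 4, "down")),
    ((5, 0), ("TASTE", 4, 0, "down")),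
    ((6, 0), ("TASTE", 4, 0, "down")),
    ((7, 0), ("TASTE", 4, 0, "down")),
    ((8, 0), ("TASTE", 4, 0, "down"))] := by decide
  rw [get_word_at_cell_alt, hd, PySem.Dict.get?_eq_none_iff_not_mem_keys]
  simp only [PySem.Dict.keys_mk, List.map_cons, List.map_nil, List.mem_cons,
    List.not_mem_nil, Prod.mk.injEq, not_or, or_false]
  omega

-- ===== VERDICT (by name: the statement is the Claim_ definition above) =====
theorem get_word_at_cell_spec : Claim_equal_get_word_at_cell := by
  intro row col _
  unfold Spec_get_word_at_cell
  by_cases h : 0 ≤ row ∧ row ≤ 8 ∧ 0 ≤ col ∧ col ≤ 8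
  · obtain ⟨h1, h2, h3, h4⟩ := h
    interval_cases row <;> interval_cases col <;> decide
  · rw [a_none_outside row col h, b_none_outside row col h]
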